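-- pv_equiv track=rewrite | github.com/chaser1780/okra_assistant | app/task_state.py | interpret_run_output_line
-- ===== SOURCE A (Python) =====
-- def interpret_run_output_line(clean: str) -> str | None:
--     mapping = [
--         (">>> START ", "当前步骤："),
--         (">>> DONE ", "最近完成："),
--         (">>> AGENT_START ", "当前 Agent："),
--         (">>> AGENT_DONE ", "最近完成 Agent："),
--         (">>> AGENT_FAIL ", "Agent 失败："),
--         (">>> PIPELINE_DONE ", "流水线完成："),
--     ]
--     for prefix, label in mapping:
--         if clean.startswith(prefix):
--             return label + clean.removeprefix(prefix).strip()
--     return None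
-- ===== SOURCE B (Python) =====
-- def interpret_run_output_line(clean: str) -> str | None:
--     labels = {
--         "START": "当前步骤：",
--         "DONE": "最近完成：",
--         "AGENT_START": "当前 Agent：",
--         "AGENT_DONE": "最近完成 Agent：",
--         "AGENT_FAIL": "Agent 失败：",
--         "PIPELINE_DONE": "流水线完成：",
--     }
--     if not clean.startswith(">>> "):
--         return None
--     rest = clean[4:]
--     i = rest.find(" ")
--     if i < 0:
--         return None
--     label = labels.get(rest[:i])
--     if label is None:
--         return None
--     return label + rest[i + 1:].strip()
-- ===== Notes on version B (the rewrite author's own statement) =====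
-- stated objective: idiomatic
-- what changed: Instead of scanning six full prefixes with startswith, B parses the line once: check the common marker, split the remainder at its first space, and look the token up in a dict of label mappings.
import Mathlib
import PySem

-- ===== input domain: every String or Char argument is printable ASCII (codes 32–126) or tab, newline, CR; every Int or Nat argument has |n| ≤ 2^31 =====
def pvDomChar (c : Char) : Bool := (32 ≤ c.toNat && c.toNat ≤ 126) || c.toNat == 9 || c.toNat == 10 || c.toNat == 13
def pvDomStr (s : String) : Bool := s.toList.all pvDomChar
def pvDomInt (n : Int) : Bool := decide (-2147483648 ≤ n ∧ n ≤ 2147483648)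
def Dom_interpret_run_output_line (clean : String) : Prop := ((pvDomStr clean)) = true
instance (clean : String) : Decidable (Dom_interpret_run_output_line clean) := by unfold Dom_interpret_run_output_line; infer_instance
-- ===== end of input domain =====

-- B parses the line once ('>>> ' marker, token up to the first space, dict lookup) instead of
-- A's scan over six full prefixes; same return value everywhere (proved below).

-- ===== PORT A =====
-- exact port of str.removeprefix
def pvRemoveprefix (s p : String) : String :=
  if PySem.Str.startswith s p = true then PySem.Str.slice s (some (p.toList.length : Int)) none else s

def pvMapping : List (String × String) :=
  [(">>> START ", "当前步骤："),
   (">>> DONE ", "最近完成："),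
   (">>> AGENT_START ", "当前 Agent："),
   (">>> AGENT_DONE ", "最近完成 Agent："),
   (">>> AGENT_FAIL ", "Agent 失败："),
   (">>> PIPELINE_DONE ", "流水线完成：")]

-- the for-loop with early return, as structural recursion over the mapping list
def pvLoopA : List (String × String) → String → Option String
  | [], _ => none
  | (pre, label) :: rest, clean =>
    if PySem.Str.startswith clean pre = true then
      some (label ++ PySem.Str.strip (pvRemoveprefix clean pre))
    else pvLoopA rest clean

def interpret_run_output_line (clean : String) : Option String :=
  pvLoopA pvMapping clean

-- ===== PORT B =====
def pvLabels : PySem.Dict String String :=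
  PySem.Dict.ofList
    [("START", "当前步骤："),
     ("DONE", "最近完成："),
     ("AGENT_START", "当前 Agent："),
     ("AGENT_DONE", "最近完成 Agent："),
     ("AGENT_FAIL", "Agent 失败："),
     ("PIPELINE_DONE", "流水线完成：")]

def interpret_run_output_line_alt (clean : String) : Option String :=
  if PySem.Str.startswith clean ">>> " = true then
    let rest := PySem.Str.slice clean (some 4) none
    let i := PySem.Str.find rest " "
    if i < 0 then none
    else
      match pvLabels.get? (PySem.Str.slice rest none (some i)) with
      | none => none
      | some label => some (label ++ PySem.Str.strip (PySem.Str.slice rest (some (i + 1)) none))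
  else none

-- ===== PRECONDITION & SPEC =====
def Spec_interpret_run_output_line (clean : String) (out : Option String) : Prop := out = interpret_run_output_line_alt clean
instance (clean : String) (out : Option String) : Decidable (Spec_interpret_run_output_line clean out) := by unfold Spec_interpret_run_output_line; infer_instance

-- ===== CLAIM (what is proved, stated in full; the proofs are below) =====
def Claim_equal_interpret_run_output_line : Prop := ∀ (clean : String), Dom_interpret_run_output_line clean → Spec_interpret_run_output_line clean (interpret_run_output_line clean)

-- ===== LEMMAS AND PROOFS =====


-- [c] is a prefix of R.drop j exactly when R[j]? = c
theorem pv_sp_iff (R : List Char) (j : Nat) (c : Char) : [c] <+: R.drop j ↔ R[j]? = some c := by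
  constructor
  · rintro ⟨t, ht⟩
    have h0 : (R.drop j)[0]? = some c := by rw [← ht]; rfl
    simpa [List.getElem?_drop] using h0
  · intro h
    have h0 : (R.drop j)[0]? = some c := by simpa [List.getElem?_drop] using h
    cases hD : R.drop j with
    | nil => rw [hD] at h0; simp at h0
    | cons a t =>
      rw [hD] at h0
      simp at h0
      exact ⟨t, by simp [h0]⟩

-- A's k-th condition, cancelled down to R and characterised by the first space
theorem pv_cond_iff (clean : String) (R TOK : List Char) (p : String)
    (hp : p.toList = ">>> ".toList ++ (TOK ++ [' ']))
    (hR : ">>> ".toList ++ R = clean.toList)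
    (hT : ' ' ∉ TOK) (n : Nat)
    (h1 : R[n]? = some ' ') (h2 : ∀ j < n, R[j]? ≠ some ' ') :
    (PySem.Str.startswith clean p = true ↔ R.take n = TOK) := by
  rw [PySem.Str.startswith_eq, PySem.Chars.startswith_iff, hp, ← hR,
    List.prefix_append_right_inj]
  constructor
  · rintro h
    obtain ⟨t2, ht2⟩ := h
    have hget : ∀ j, j < TOK.length + 1 → R[j]? = (TOK ++ [' '])[j]? := by
      intro j hj
      rw [← ht2, List.getElem?_append_left (by simpa using hj)]
    have hsp : R[TOK.length]? = some ' ' := by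
      rw [hget TOK.length (by omega)]
      simp
    have hne : ∀ j, j < TOK.length → R[j]? ≠ some ' ' := by
      intro j hj heq
      rw [hget j (by omega), List.getElem?_append_left (by simpa using hj)] at heq
      have : TOK[j] = ' ' := by simpa [List.getElem?_eq_getElem hj] using heq
      exact hT (this ▸ List.getElem_mem hj)
    have hn : n = TOK.length := by
      rcases lt_trichotomy n TOK.length with h' | h' | h'
      · exact absurd h1 (hne n h')
      · exact h'
      · exact absurd hsp (h2 _ h')
    have hpre : TOK <+: R := ⟨' ' :: t2, by simpa using ht2⟩
    rw [hn]
    exact (List.prefix_iff_eq_take.mp hpre).symm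
  · intro h
    obtain ⟨t, ht⟩ := (pv_sp_iff R n ' ').mpr h1
    refine ⟨t, ?_⟩
    calc TOK ++ [' '] ++ t = R.take n ++ ([' '] ++ t) := by rw [h]; simp
    _ = R.take n ++ R.drop n := by rw [ht]
    _ = R := List.take_append_drop n R

-- when R has no space at all, no full prefix can match
theorem pv_cond_false_nospace (clean : String) (R TOK : List Char) (p : String)
    (hp : p.toList = ">>> ".toList ++ (TOK ++ [' ']))
    (hR : ">>> ".toList ++ R = clean.toList)
    (hno : ∀ j, ¬ [' '] <+: R.drop j) :
    PySem.Str.startswith clean p = false := by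
  rw [Bool.eq_false_iff]
  intro hc
  rw [PySem.Str.startswith_eq, PySem.Chars.startswith_iff, hp, ← hR,
    List.prefix_append_right_inj] at hc
  obtain ⟨t2, ht2⟩ := hc
  refine hno TOK.length ⟨t2, ?_⟩
  rw [← ht2]
  simp

-- when clean does not start with ">>> ", no full prefix can match
theorem pv_cond_false_nostart (clean p : String) (hpp : ">>> ".toList <+: p.toList)
    (h4 : PySem.Str.startswith clean ">>> " = false) :
    PySem.Str.startswith clean p = false := by
  rw [Bool.eq_false_iff] at h4 ⊢
  intro hc
  rw [PySem.Str.startswith_eq, PySem.Chars.startswith_iff] at hc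
  rw [PySem.Str.startswith_eq] at h4
  exact h4 ((PySem.Chars.startswith_iff _ _).mpr (hpp.trans hc))

-- the matched branch: A's removeprefix+... tail equals B's slice after the space
theorem pv_val_eq (clean rest : String) (R TOK : List Char) (p : String) (i : Int)
    (hp : p.toList = ">>> ".toList ++ (TOK ++ [' ']))
    (hR : ">>> ".toList ++ R = clean.toList)
    (hrest : rest.toList = R)
    (h0 : 0 ≤ i)
    (hsw : PySem.Str.startswith clean p = true)
    (hn : R.take i.toNat = TOK)
    (h1 : R[i.toNat]? = some ' ') :
    pvRemoveprefix clean p = PySem.Str.slice rest (some (i + 1)) none := by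
  have hlt : i.toNat < R.length := List.getElem?_eq_some_iff.mp h1 |>.1
  have hlen : TOK.length = i.toNat := by
    rw [← hn]; simp [List.length_take]; omega
  apply String.toList_inj.mp
  rw [pvRemoveprefix, if_pos hsw, PySem.Str.toList_slice, PySem.Str.toList_slice,
    PySem.Chars.slice_eq_listSlice, PySem.Chars.slice_eq_listSlice,
    PySem.List.slice_from _ (Int.natCast_nonneg p.toList.length),
    PySem.List.slice_from _ (by omega : (0:Int) ≤ i + 1)]
  have hplen : p.toList.length = 4 + (TOK.length + 1) := by simp [hp]; omega
  have h15 : ((p.toList.length : Int)).toNat = 4 + (TOK.length + 1) := by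
    omega
  rw [h15, hrest, ← hR]
  have hd : (">>> ".toList ++ R).drop (4 + (TOK.length + 1)) = R.drop (TOK.length + 1) := by
    show List.drop (4 + (TOK.length + 1)) ('>' :: '>' :: '>' :: ' ' :: R) = R.drop (TOK.length + 1)
    rw [show 4 + (TOK.length + 1) = 1 + (1 + (1 + (1 + (TOK.length + 1)))) from by omega]
    simp [Nat.one_add]
  rw [hd, hlen, show (i + 1).toNat = i.toNat + 1 from by omega]

-- the dict lookup misses when the token is none of the six keys
theorem pvLabels_get?_none (k : String)
    (h1 : k ≠ "START")
    (h2 : k ≠ "DONE")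
    (h3 : k ≠ "AGENT_START")
    (h4 : k ≠ "AGENT_DONE")
    (h5 : k ≠ "AGENT_FAIL")
    (h6 : k ≠ "PIPELINE_DONE")
    : pvLabels.get? k = none := by
  have hm : pvLabels = PySem.Dict.mk
    [("START", "当前步骤："), ("DONE", "最近完成："), ("AGENT_START", "当前 Agent："), ("AGENT_DONE", "最近完成 Agent："), ("AGENT_FAIL", "Agent 失败："), ("PIPELINE_DONE", "流水线完成：")] := by decide
  rw [hm, PySem.Dict.get?_mk_cons, PySem.Dict.get?_mk_cons, PySem.Dict.get?_mk_cons,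
    PySem.Dict.get?_mk_cons, PySem.Dict.get?_mk_cons, PySem.Dict.get?_mk_cons]
  simp [h1.symm, h2.symm, h3.symm, h4.symm, h5.symm, h6.symm, PySem.Dict.get?]

theorem pv_main : ∀ (clean : String), interpret_run_output_line clean = interpret_run_output_line_alt clean := by
  intro clean
  by_cases h4 : PySem.Str.startswith clean ">>> " = true
  · obtain ⟨R, hR⟩ : ∃ R, ">>> ".toList ++ R = clean.toList := by
      have h := (PySem.Chars.startswith_iff clean.toList ">>> ".toList).mp
        (by rw [← PySem.Str.startswith_eq]; exact h4)
      obtain ⟨t, ht⟩ := h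
      exact ⟨t, ht⟩
    have hrest : (PySem.Str.slice clean (some 4) none).toList = R := by
      rw [PySem.Str.toList_slice, PySem.Chars.slice_eq_listSlice,
        PySem.List.slice_from _ (by norm_num : (0:Int) ≤ 4), ← hR]
      rfl
    have hfind : PySem.Str.find (PySem.Str.slice clean (some 4) none) " "
        = PySem.Chars.find R [' '] := by
      rw [PySem.Str.find_eq, hrest]
      rfl
    by_cases hineg : PySem.Chars.find R [' '] < 0
    · have hm1 : PySem.Chars.find R [' '] = -1 := by
        have := PySem.Chars.neg_one_le_find R [' ']
        omega
      have hno : ∀ j, ¬ [' '] <+: R.drop j := by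
        intro j hj
        exact (PySem.Chars.find_eq_neg_one_iff R [' ']).mp hm1
          ((PySem.Chars.isIn_iff_infix [' '] R).mp
            ((PySem.Chars.exists_prefix_drop_iff_isIn [' '] R).mp ⟨j, hj⟩))
      have ns1 : PySem.Str.startswith clean ">>> START " = false :=
        pv_cond_false_nospace clean R "START".toList ">>> START " (by decide) hR hno
      have hn1 : ¬ (PySem.Str.startswith clean ">>> START " = true) := by
        rw [ns1]
        exact Bool.false_ne_true
      have ns2 : PySem.Str.startswith clean ">>> DONE " = false :=
        pv_cond_false_nospace clean R "DONE".toList ">>> DONE " (by decide) hR hno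
      have hn2 : ¬ (PySem.Str.startswith clean ">>> DONE " = true) := by
        rw [ns2]
        exact Bool.false_ne_true
      have ns3 : PySem.Str.startswith clean ">>> AGENT_START " = false :=
        pv_cond_false_nospace clean R "AGENT_START".toList ">>> AGENT_START " (by decide) hR hno
      have hn3 : ¬ (PySem.Str.startswith clean ">>> AGENT_START " = true) := by
        rw [ns3]
        exact Bool.false_ne_true
      have ns4 : PySem.Str.startswith clean ">>> AGENT_DONE " = false :=
        pv_cond_false_nospace clean R "AGENT_DONE".toList ">>> AGENT_DONE " (by decide) hR hno
      have hn4 : ¬ (PySem.Str.startswith clean ">>> AGENT_DONE " = true) := by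
        rw [ns4]
        exact Bool.false_ne_true
      have ns5 : PySem.Str.startswith clean ">>> AGENT_FAIL " = false :=
        pv_cond_false_nospace clean R "AGENT_FAIL".toList ">>> AGENT_FAIL " (by decide) hR hno
      have hn5 : ¬ (PySem.Str.startswith clean ">>> AGENT_FAIL " = true) := by
        rw [ns5]
        exact Bool.false_ne_true
      have ns6 : PySem.Str.startswith clean ">>> PIPELINE_DONE " = false :=
        pv_cond_false_nospace clean R "PIPELINE_DONE".toList ">>> PIPELINE_DONE " (by decide) hR hno
      have hn6 : ¬ (PySem.Str.startswith clean ">>> PIPELINE_DONE " = true) := by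
        rw [ns6]
        exact Bool.false_ne_true
      unfold interpret_run_output_line interpret_run_output_line_alt
      simp only [pvMapping, pvLoopA]
      rw [if_neg hn1, if_neg hn2, if_neg hn3, if_neg hn4, if_neg hn5, if_neg hn6, if_pos h4]
      simp only [hfind, hm1]
      norm_num
    · have h0 : 0 ≤ PySem.Chars.find R [' '] := by omega
      obtain ⟨hP, hmin⟩ := PySem.Chars.find_spec h0
      have h1 : R[(PySem.Chars.find R [' ']).toNat]? = some ' ' := (pv_sp_iff R _ ' ').mp hP
      have h2 : ∀ j < (PySem.Chars.find R [' ']).toNat, R[j]? ≠ some ' ' :=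
        fun j hj hc => hmin j hj ((pv_sp_iff R j ' ').mpr hc)
      have htok : (PySem.Str.slice (PySem.Str.slice clean (some 4) none) none
          (some (PySem.Chars.find R [' ']))).toList
          = R.take (PySem.Chars.find R [' ']).toNat := by
        rw [PySem.Str.toList_slice, PySem.Chars.slice_eq_listSlice, hrest,
          PySem.List.slice_to _ h0]
      have e1 := pv_cond_iff clean R "START".toList ">>> START " (by decide) hR (by decide)
        (PySem.Chars.find R [' ']).toNat h1 h2
      have e2 := pv_cond_iff clean R "DONE".toList ">>> DONE " (by decide) hR (by decide)
        (PySem.Chars.find R [' ']).toNat h1 h2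
      have e3 := pv_cond_iff clean R "AGENT_START".toList ">>> AGENT_START " (by decide) hR (by decide)
        (PySem.Chars.find R [' ']).toNat h1 h2
      have e4 := pv_cond_iff clean R "AGENT_DONE".toList ">>> AGENT_DONE " (by decide) hR (by decide)
        (PySem.Chars.find R [' ']).toNat h1 h2
      have e5 := pv_cond_iff clean R "AGENT_FAIL".toList ">>> AGENT_FAIL " (by decide) hR (by decide)
        (PySem.Chars.find R [' ']).toNat h1 h2
      have e6 := pv_cond_iff clean R "PIPELINE_DONE".toList ">>> PIPELINE_DONE " (by decide) hR (by decide)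
        (PySem.Chars.find R [' ']).toNat h1 h2
      by_cases c1 : R.take (PySem.Chars.find R [' ']).toNat = "START".toList
      · have sw : PySem.Str.startswith clean ">>> START " = true := e1.mpr c1
        have htokstr : PySem.Str.slice (PySem.Str.slice clean (some 4) none) none
            (some (PySem.Chars.find R [' '])) = "START" :=
          String.toList_inj.mp (by rw [htok, c1])
        have hget : pvLabels.get? "START" = some "当前步骤：" := by decide
        have hval := pv_val_eq clean (PySem.Str.slice clean (some 4) none) R "START".toList
          ">>> START " (PySem.Chars.find R [' ']) (by decide) hR hrest h0 sw c1 h1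
        unfold interpret_run_output_line interpret_run_output_line_alt
        simp only [pvMapping, pvLoopA]
        rw [if_pos sw, if_pos h4]
        simp only [hfind]
        rw [if_neg hineg, htokstr, hget]
        simp [hval]
      · have a1 : PySem.Str.startswith clean ">>> START " = false := by
          cases hb : PySem.Str.startswith clean ">>> START " with
          | false => rfl
          | true => exact absurd (e1.mp hb) c1
        have hn1 : ¬ (PySem.Str.startswith clean ">>> START " = true) := by
          rw [a1]
          exact Bool.false_ne_true
        by_cases c2 : R.take (PySem.Chars.find R [' ']).toNat = "DONE".toList
        · have sw : PySem.Str.startswith clean ">>> DONE " = true := e2.mpr c2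
          have htokstr : PySem.Str.slice (PySem.Str.slice clean (some 4) none) none
              (some (PySem.Chars.find R [' '])) = "DONE" :=
            String.toList_inj.mp (by rw [htok, c2])
          have hget : pvLabels.get? "DONE" = some "最近完成：" := by decide
          have hval := pv_val_eq clean (PySem.Str.slice clean (some 4) none) R "DONE".toList
            ">>> DONE " (PySem.Chars.find R [' ']) (by decide) hR hrest h0 sw c2 h1
          unfold interpret_run_output_line interpret_run_output_line_alt
          simp only [pvMapping, pvLoopA]
          rw [if_neg hn1, if_pos sw, if_pos h4]
          simp only [hfind]
          rw [if_neg hineg, htokstr, hget]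
          simp [hval]
        · have a2 : PySem.Str.startswith clean ">>> DONE " = false := by
            cases hb : PySem.Str.startswith clean ">>> DONE " with
            | false => rfl
            | true => exact absurd (e2.mp hb) c2
          have hn2 : ¬ (PySem.Str.startswith clean ">>> DONE " = true) := by
            rw [a2]
            exact Bool.false_ne_true
          by_cases c3 : R.take (PySem.Chars.find R [' ']).toNat = "AGENT_START".toList
          · have sw : PySem.Str.startswith clean ">>> AGENT_START " = true := e3.mpr c3
            have htokstr : PySem.Str.slice (PySem.Str.slice clean (some 4) none) none
                (some (PySem.Chars.find R [' '])) = "AGENT_START" :=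
              String.toList_inj.mp (by rw [htok, c3])
            have hget : pvLabels.get? "AGENT_START" = some "当前 Agent：" := by decide
            have hval := pv_val_eq clean (PySem.Str.slice clean (some 4) none) R "AGENT_START".toList
              ">>> AGENT_START " (PySem.Chars.find R [' ']) (by decide) hR hrest h0 sw c3 h1
            unfold interpret_run_output_line interpret_run_output_line_alt
            simp only [pvMapping, pvLoopA]
            rw [if_neg hn1, if_neg hn2, if_pos sw, if_pos h4]
            simp only [hfind]
            rw [if_neg hineg, htokstr, hget]
            simp [hval]
          · have a3 : PySem.Str.startswith clean ">>> AGENT_START " = false := by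
              cases hb : PySem.Str.startswith clean ">>> AGENT_START " with
              | false => rfl
              | true => exact absurd (e3.mp hb) c3
            have hn3 : ¬ (PySem.Str.startswith clean ">>> AGENT_START " = true) := by
              rw [a3]
              exact Bool.false_ne_true
            by_cases c4 : R.take (PySem.Chars.find R [' ']).toNat = "AGENT_DONE".toList
            · have sw : PySem.Str.startswith clean ">>> AGENT_DONE " = true := e4.mpr c4
              have htokstr : PySem.Str.slice (PySem.Str.slice clean (some 4) none) none
                  (some (PySem.Chars.find R [' '])) = "AGENT_DONE" :=
                String.toList_inj.mp (by rw [htok, c4])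
              have hget : pvLabels.get? "AGENT_DONE" = some "最近完成 Agent：" := by decide
              have hval := pv_val_eq clean (PySem.Str.slice clean (some 4) none) R "AGENT_DONE".toList
                ">>> AGENT_DONE " (PySem.Chars.find R [' ']) (by decide) hR hrest h0 sw c4 h1
              unfold interpret_run_output_line interpret_run_output_line_alt
              simp only [pvMapping, pvLoopA]
              rw [if_neg hn1, if_neg hn2, if_neg hn3, if_pos sw, if_pos h4]
              simp only [hfind]
              rw [if_neg hineg, htokstr, hget]
              simp [hval]
            · have a4 : PySem.Str.startswith clean ">>> AGENT_DONE " = false := by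
                cases hb : PySem.Str.startswith clean ">>> AGENT_DONE " with
                | false => rfl
                | true => exact absurd (e4.mp hb) c4
              have hn4 : ¬ (PySem.Str.startswith clean ">>> AGENT_DONE " = true) := by
                rw [a4]
                exact Bool.false_ne_true
              by_cases c5 : R.take (PySem.Chars.find R [' ']).toNat = "AGENT_FAIL".toList
              · have sw : PySem.Str.startswith clean ">>> AGENT_FAIL " = true := e5.mpr c5
                have htokstr : PySem.Str.slice (PySem.Str.slice clean (some 4) none) none
                    (some (PySem.Chars.find R [' '])) = "AGENT_FAIL" :=
                  String.toList_inj.mp (by rw [htok, c5])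
                have hget : pvLabels.get? "AGENT_FAIL" = some "Agent 失败：" := by decide
                have hval := pv_val_eq clean (PySem.Str.slice clean (some 4) none) R "AGENT_FAIL".toList
                  ">>> AGENT_FAIL " (PySem.Chars.find R [' ']) (by decide) hR hrest h0 sw c5 h1
                unfold interpret_run_output_line interpret_run_output_line_alt
                simp only [pvMapping, pvLoopA]
                rw [if_neg hn1, if_neg hn2, if_neg hn3, if_neg hn4, if_pos sw, if_pos h4]
                simp only [hfind]
                rw [if_neg hineg, htokstr, hget]
                simp [hval]
              · have a5 : PySem.Str.startswith clean ">>> AGENT_FAIL " = false := by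
                  cases hb : PySem.Str.startswith clean ">>> AGENT_FAIL " with
                  | false => rfl
                  | true => exact absurd (e5.mp hb) c5
                have hn5 : ¬ (PySem.Str.startswith clean ">>> AGENT_FAIL " = true) := by
                  rw [a5]
                  exact Bool.false_ne_true
                by_cases c6 : R.take (PySem.Chars.find R [' ']).toNat = "PIPELINE_DONE".toList
                · have sw : PySem.Str.startswith clean ">>> PIPELINE_DONE " = true := e6.mpr c6
                  have htokstr : PySem.Str.slice (PySem.Str.slice clean (some 4) none) none
                      (some (PySem.Chars.find R [' '])) = "PIPELINE_DONE" :=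
                    String.toList_inj.mp (by rw [htok, c6])
                  have hget : pvLabels.get? "PIPELINE_DONE" = some "流水线完成：" := by decide
                  have hval := pv_val_eq clean (PySem.Str.slice clean (some 4) none) R "PIPELINE_DONE".toList
                    ">>> PIPELINE_DONE " (PySem.Chars.find R [' ']) (by decide) hR hrest h0 sw c6 h1
                  unfold interpret_run_output_line interpret_run_output_line_alt
                  simp only [pvMapping, pvLoopA]
                  rw [if_neg hn1, if_neg hn2, if_neg hn3, if_neg hn4, if_neg hn5, if_pos sw, if_pos h4]
                  simp only [hfind]
                  rw [if_neg hineg, htokstr, hget]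
                  simp [hval]
                · have a6 : PySem.Str.startswith clean ">>> PIPELINE_DONE " = false := by
                    cases hb : PySem.Str.startswith clean ">>> PIPELINE_DONE " with
                    | false => rfl
                    | true => exact absurd (e6.mp hb) c6
                  have hn6 : ¬ (PySem.Str.startswith clean ">>> PIPELINE_DONE " = true) := by
                    rw [a6]
                    exact Bool.false_ne_true
                  have hne1 : PySem.Str.slice (PySem.Str.slice clean (some 4) none) none
                      (some (PySem.Chars.find R [' '])) ≠ "START" := by
                    intro hh
                    apply c1
                    rw [← htok, hh]
                  have hne2 : PySem.Str.slice (PySem.Str.slice clean (some 4) none) none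
                      (some (PySem.Chars.find R [' '])) ≠ "DONE" := by
                    intro hh
                    apply c2
                    rw [← htok, hh]
                  have hne3 : PySem.Str.slice (PySem.Str.slice clean (some 4) none) none
                      (some (PySem.Chars.find R [' '])) ≠ "AGENT_START" := by
                    intro hh
                    apply c3
                    rw [← htok, hh]
                  have hne4 : PySem.Str.slice (PySem.Str.slice clean (some 4) none) none
                      (some (PySem.Chars.find R [' '])) ≠ "AGENT_DONE" := by
                    intro hh
                    apply c4
                    rw [← htok, hh]
                  have hne5 : PySem.Str.slice (PySem.Str.slice clean (some 4) none) none
                      (some (PySem.Chars.find R [' '])) ≠ "AGENT_FAIL" := by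
                    intro hh
                    apply c5
                    rw [← htok, hh]
                  have hne6 : PySem.Str.slice (PySem.Str.slice clean (some 4) none) none
                      (some (PySem.Chars.find R [' '])) ≠ "PIPELINE_DONE" := by
                    intro hh
                    apply c6
                    rw [← htok, hh]
                  have hnone := pvLabels_get?_none _ hne1 hne2 hne3 hne4 hne5 hne6
                  unfold interpret_run_output_line interpret_run_output_line_alt
                  simp only [pvMapping, pvLoopA]
                  rw [if_neg hn1, if_neg hn2, if_neg hn3, if_neg hn4, if_neg hn5, if_neg hn6, if_pos h4]
                  simp only [hfind]
                  rw [if_neg hineg, hnone]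
  · have h4' : PySem.Str.startswith clean ">>> " = false := by
      cases hb : PySem.Str.startswith clean ">>> " with
      | false => rfl
      | true => exact absurd hb h4
    have na1 : PySem.Str.startswith clean ">>> START " = false :=
      pv_cond_false_nostart clean ">>> START " (by decide) h4'
    have hn1 : ¬ (PySem.Str.startswith clean ">>> START " = true) := by
      rw [na1]
      exact Bool.false_ne_true
    have na2 : PySem.Str.startswith clean ">>> DONE " = false :=
      pv_cond_false_nostart clean ">>> DONE " (by decide) h4'
    have hn2 : ¬ (PySem.Str.startswith clean ">>> DONE " = true) := by
      rw [na2]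
      exact Bool.false_ne_true
    have na3 : PySem.Str.startswith clean ">>> AGENT_START " = false :=
      pv_cond_false_nostart clean ">>> AGENT_START " (by decide) h4'
    have hn3 : ¬ (PySem.Str.startswith clean ">>> AGENT_START " = true) := by
      rw [na3]
      exact Bool.false_ne_true
    have na4 : PySem.Str.startswith clean ">>> AGENT_DONE " = false :=
      pv_cond_false_nostart clean ">>> AGENT_DONE " (by decide) h4'
    have hn4 : ¬ (PySem.Str.startswith clean ">>> AGENT_DONE " = true) := by
      rw [na4]
      exact Bool.false_ne_true
    have na5 : PySem.Str.startswith clean ">>> AGENT_FAIL " = false :=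
      pv_cond_false_nostart clean ">>> AGENT_FAIL " (by decide) h4'
    have hn5 : ¬ (PySem.Str.startswith clean ">>> AGENT_FAIL " = true) := by
      rw [na5]
      exact Bool.false_ne_true
    have na6 : PySem.Str.startswith clean ">>> PIPELINE_DONE " = false :=
      pv_cond_false_nostart clean ">>> PIPELINE_DONE " (by decide) h4'
    have hn6 : ¬ (PySem.Str.startswith clean ">>> PIPELINE_DONE " = true) := by
      rw [na6]
      exact Bool.false_ne_true
    unfold interpret_run_output_line interpret_run_output_line_alt
    simp only [pvMapping, pvLoopA]
    rw [if_neg hn1, if_neg hn2, if_neg hn3, if_neg hn4, if_neg hn5, if_neg hn6, if_neg h4]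

-- ===== VERDICT (by name: the statement is the Claim_ definition above) =====
theorem interpret_run_output_line_spec : Claim_equal_interpret_run_output_line := by
  intro clean _
  unfold Spec_interpret_run_output_line
  exact pv_main clean
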